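-- pv_equiv track=rewrite | github.com/jianghezhishi/Geography-as-Manifolds | location_choice/loc_choice.py | greedy_nodup
-- ===== SOURCE A (Python) =====
-- def greedy_nodup(cover,k):
--     """无重复贪心，每次选择删掉覆盖过的个体
--
--     Args:
--         cover (_type_): 轨迹覆盖
--         k (_type_): 选点数
--
--     Returns:
--         _type_: 选点结果[cid]
--     """
--     #贪心无重复，覆盖人数多的格子先输出，已被它覆盖的个体将不再被计入后续格子的覆盖人数
--     cover1=cover.copy()
--     res_list=[]
--     for i in range(k):
--         cid_num={}
--         for cid in cover1:
--             cid_num[cid]=len(cover1[cid])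
--         temp=sorted(cid_num.items(),key=lambda x:x[1],reverse=True)
--         cid0=temp[0][0]
--         uid_set=cover1[cid0]
--         res_list.append(cid0)
--         del cover1[cid0]
--         for cid in cover1:
--             cover1[cid]=cover1[cid]-uid_set
--     return res_list
-- ===== SOURCE B (Python) =====
-- def greedy_nodup(cover, k):
--     """Greedy max-coverage selection, same result as the original: keeps the
--     input dict untouched and maintains one growing set of already-covered
--     individuals instead of rebuilding the dict with per-set subtraction."""
--     used = set()
--     chosen = set()
--     selected = []
--     for _ in range(k):
--         candidates = [cid for cid in cover if cid not in chosen]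
--         if not candidates:
--             return selected  # the original raises IndexError here (k exceeds the number of cells)
--         best = max(candidates, key=lambda c: len(cover[c] - used))
--         selected.append(best)
--         chosen.add(best)
--         used |= cover[best]
--     return selected
-- ===== Notes on version B (the rewrite author's own statement) =====
-- stated objective: alternative
-- what changed: Instead of copying the dict and each round sorting all coverage sizes and rebuilding it by deleting the chosen cell and subtracting its set from every remaining value, B leaves the input untouched and keeps one growing 'used' set, each round taking the first max of len(cover[c] - used) over the not-yet-selected cids.
import Mathlib
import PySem

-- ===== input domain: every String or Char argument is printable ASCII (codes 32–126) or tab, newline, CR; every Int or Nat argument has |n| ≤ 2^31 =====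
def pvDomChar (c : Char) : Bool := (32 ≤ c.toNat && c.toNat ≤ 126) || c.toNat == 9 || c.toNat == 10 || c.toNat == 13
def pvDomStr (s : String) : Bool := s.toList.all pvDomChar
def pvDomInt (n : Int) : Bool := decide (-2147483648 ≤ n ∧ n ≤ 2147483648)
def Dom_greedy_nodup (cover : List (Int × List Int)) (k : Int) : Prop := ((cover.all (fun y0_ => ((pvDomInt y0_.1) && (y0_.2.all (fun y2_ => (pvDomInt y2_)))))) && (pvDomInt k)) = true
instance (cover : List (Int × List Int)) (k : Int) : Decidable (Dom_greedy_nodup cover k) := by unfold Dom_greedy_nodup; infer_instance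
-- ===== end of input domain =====

-- B replaces A's per-round dict rebuild (copy, subtract from every remaining set, sort all sizes)
-- by one growing `used` set and a first-max scan over the untouched input — an alternative data flow,
-- same return value. Neither mutates its arguments.

-- Shared argument decoding: the Python argument is a dict mapping cid to a SET of uids;
-- under the type convention it arrives as an association list of (cid, distinct-element list).
-- `pvDecode` is exactly Python's dict construction (duplicate keys overwrite in place) with
-- each value read as a set.
def pvDecode (cover : List (Int × List Int)) : List (Int × PySem.Set Int) :=
  (PySem.Dict.ofList cover).items.map (fun p => (p.1, PySem.Set.ofList p.2))

-- Python's d[c] on a dict whose keys are unique: first (only) match; total form, used only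
-- where the key is present (otherwise Python would raise KeyError, which never happens here).
def pvLookup (d : List (Int × PySem.Set Int)) (c : Int) : PySem.Set Int :=
  match d.find? (fun p => p.1 == c) with
  | some p => p.2
  | none => []

-- ===== PORT A =====
-- the body of `for i in range(k)`: cover1 is the current dict (unique keys), res the output list.
-- `cid_num[cid] = len(cover1[cid])` over the unique keys of cover1 builds the dict whose items
-- are cover1's items with the value's length; `del` plus the value-rewriting loop (keys unchanged)
-- is the filter-then-map over the items.
def pvGreedyA : Nat → List (Int × PySem.Set Int) → List Int → List Int
  | 0, _, res_list => res_list
  | n+1, cover1, res_list =>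
    let cid_num : List (Int × Int) := cover1.map (fun p => (p.1, PySem.Set.len p.2))
    let temp := PySem.List.sorted cid_num (fun x => x.2) true
    match PySem.List.pyGet? temp 0 with
    | none => res_list   -- temp[0]: IndexError in Python (excluded by Pre_)
    | some t0 =>
      let cid0 := t0.1
      let uid_set := pvLookup cover1 cid0
      pvGreedyA n
        ((cover1.filter (fun p => !(p.1 == cid0))).map (fun p => (p.1, PySem.Set.diff p.2 uid_set)))
        (res_list ++ [cid0])

def greedy_nodup (cover : List (Int × List Int)) (k : Int) : List Int :=
  pvGreedyA k.toNat (pvDecode cover) []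

-- ===== PORT B =====
-- the body of `for _ in range(k)`: cover stays fixed; used and chosen grow; selected accumulates.
-- `max?` is Python's max(candidates, key=…): the FIRST maximal element, none exactly when
-- candidates is empty — B's early `return selected` branch.
def pvGreedyB : Nat → List (Int × PySem.Set Int) → PySem.Set Int → PySem.Set Int → List Int → List Int
  | 0, _, _, _, selected => selected
  | n+1, cover, used, chosen, selected =>
    let candidates := (cover.map (fun p => p.1)).filter (fun c => !(chosen.contains c))
    match PySem.List.max? candidates (fun c => PySem.Set.len (PySem.Set.diff (pvLookup cover c) used)) with
    | none => selected
    | some best => pvGreedyB n cover (PySem.Set.union used (pvLookup cover best))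
        (PySem.Set.add chosen best) (selected ++ [best])

def greedy_nodup_alt (cover : List (Int × List Int)) (k : Int) : List Int :=
  pvGreedyB k.toNat (pvDecode cover) PySem.Set.empty PySem.Set.empty []

-- ===== PRECONDITION & SPEC =====
-- Pre_ excludes exactly the inputs where Python A raises IndexError: k larger than the number
-- of distinct keys of the dict (temp[0] on an empty candidate list). Both ports are made total
-- by returning the selection built so far at that point, so the equivalence proof happens not
-- to consume this hypothesis; Pre_ is still needed for port A to be faithful to the Python.
def Pre_greedy_nodup (cover : List (Int × List Int)) (k : Int) : Prop :=
  k ≤ ((PySem.List.dedup (cover.map Prod.fst)).length : Int)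
instance (cover : List (Int × List Int)) (k : Int) : Decidable (Pre_greedy_nodup cover k) := by
  unfold Pre_greedy_nodup; infer_instance

def pvWitness_greedy_nodup : (List (Int × List Int)) × Int := ([(1, [10, 20]), (2, [20])], 2)

def Spec_greedy_nodup (cover : List (Int × List Int)) (k : Int) (out : List Int) : Prop := out = greedy_nodup_alt cover k
instance (cover : List (Int × List Int)) (k : Int) (out : List Int) : Decidable (Spec_greedy_nodup cover k out) := by unfold Spec_greedy_nodup; infer_instance

-- ===== CLAIM (what is proved, stated in full; the proofs are below) =====
def Claim_equal_greedy_nodup : Prop := ∀ (cover : List (Int × List Int)) (k : Int), Dom_greedy_nodup cover k → Pre_greedy_nodup cover k → Spec_greedy_nodup cover k (greedy_nodup cover k)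

-- ===== LEMMAS AND PROOFS =====

-- head of insertBy
theorem pv_head?_insertBy {α : Type} (before : α → α → Bool) (x : α) (l : List α) :
    (PySem.List.insertBy before x l).head? =
      match l.head? with
      | none => some x
      | some y => if before x y then some x else some y := by
  cases l with
  | nil => rfl
  | cons y ys => simp only [PySem.List.insertBy]; split <;> simp_all

-- the head of sorted(xs, key, reverse=True) is the FIRST element attaining the maximal key
theorem pv_head?_sorted_rev {α : Type} (key : α → Int) (xs : List α) :
    (PySem.List.sorted xs key true).head? = PySem.List.max? xs key := by
  rw [PySem.List.sorted_rev_eq_foldl_insertBy]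
  suffices h : ∀ (acc : List α),
      (xs.foldl (fun acc x => PySem.List.insertBy (fun a b => decide (key b < key a)) x acc) acc).head? =
      xs.foldl (fun m x =>
        match m with
        | none => some x
        | some m => if key m < key x then some x else some m) acc.head? by
    simpa [PySem.List.max?] using h []
  induction xs with
  | nil => intro acc; rfl
  | cons x xs ih =>
    intro acc
    simp only [List.foldl_cons, ih, pv_head?_insertBy]
    cases acc with
    | nil => rfl
    | cons a t => simp only [List.head?_cons]; by_cases h : key a < key x <;> simp [h]

theorem pv_max?_congr_mem {α : Type} (l : List α) (k1 k2 : α → Int)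
    (h : ∀ x ∈ l, k1 x = k2 x) : PySem.List.max? l k1 = PySem.List.max? l k2 := by
  simp only [PySem.List.max?]
  suffices hs : ∀ (m : Option α), (∀ z, m = some z → k1 z = k2 z) →
      l.foldl (fun acc x => match acc with
        | none => some x
        | some m => if k1 m < k1 x then some x else some m) m =
      l.foldl (fun acc x => match acc with
        | none => some x
        | some m => if k2 m < k2 x then some x else some m) m by
    exact hs none (by simp)
  induction l with
  | nil => intro m _; rfl
  | cons x xs ih =>
    intro m hm
    have hx : k1 x = k2 x := h x (by simp)
    have ih' := ih (fun y hy => h y (by simp [hy]))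
    simp only [List.foldl_cons]
    cases m with
    | none => exact ih' (some x) (by intro z hz; cases hz; exact hx)
    | some z =>
      dsimp only
      have hz : k1 z = k2 z := hm z rfl
      rw [show (if k1 z < k1 x then some x else some z) = (if k2 z < k2 x then some x else some z) by
        rw [hx, hz]]
      by_cases hc : k2 z < k2 x
      · simp only [hc, if_pos]
        exact ih' (some x) (by intro w hw; cases hw; exact hx)
      · simp only [hc, if_false]
        exact ih' (some z) (by intro w hw; cases hw; exact hz)

theorem pv_max?_map {α β : Type} (l : List α) (f : α → β) (key : β → Int) :
    PySem.List.max? (l.map f) key = (PySem.List.max? l (fun x => key (f x))).map f := by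
  simp only [PySem.List.max?, List.foldl_map]
  suffices hs : ∀ (m : Option α),
      l.foldl (fun acc x => match acc with
        | none => some (f x)
        | some b => if key b < key (f x) then some (f x) else some b) (m.map f) =
      (l.foldl (fun acc x => match acc with
        | none => some x
        | some z => if key (f z) < key (f x) then some x else some z) m).map f by
    exact hs none
  induction l with
  | nil => intro m; rfl
  | cons x xs ih =>
    intro m
    simp only [List.foldl_cons]
    cases m with
    | none => exact ih (some x)
    | some z =>
      dsimp only
      by_cases hc : key (f z) < key (f x)
      · simpa [Option.map, hc] using ih (some x)
      · simpa [Option.map, hc] using ih (some z)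

-- lookup in an association list with unique keys finds the stored value
theorem pv_lookup_mem : ∀ (d : List (Int × PySem.Set Int)) (c : Int) (s : PySem.Set Int),
    (d.map (fun p => p.1)).Nodup → (c, s) ∈ d → pvLookup d c = s
  | [], _, _, _, h => by cases h
  | q :: t, c, s, hnd, h => by
    simp only [List.map_cons, List.nodup_cons, List.mem_map] at hnd
    rcases List.mem_cons.mp h with h' | h'
    · rw [← h']; simp [pvLookup]
    · have hne : ¬(q.1 == c) = true := by
        simp only [beq_iff_eq]
        intro hqc
        exact hnd.1 ⟨(c, s), h', by simp [hqc]⟩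
      simp only [pvLookup, List.find?_cons, hne]
      simpa [pvLookup] using pv_lookup_mem t c s hnd.2 h'

-- projecting the keys commutes with a filter that reads only the key
theorem pv_map_fst_filter {β : Type} (q : Int → Bool) (l : List (Int × β)) :
    (l.filter (fun p => q p.1)).map (fun p => p.1) = (l.map (fun p => p.1)).filter q := by
  induction l with
  | nil => rfl
  | cons x t ih => by_cases hx : q x.1 <;> simp [hx, ih]

-- a filter that reads only the key commutes with a key-preserving map
theorem pv_filter_map_fst {β γ : Type} (q : Int → Bool) (g : (Int × β) → γ) (l : List (Int × β)) :
    ((l.map (fun p => (p.1, g p))).filter (fun p => q p.1)) =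
      (l.filter (fun p => q p.1)).map (fun p => (p.1, g p)) := by
  induction l with
  | nil => rfl
  | cons x t ih => by_cases hx : q x.1 <;> simp [hx, ih]

-- iterated subtraction is subtraction of the union: (s - u) - (t - u) = s - (u | t)
theorem pv_diff_diff (s t u : PySem.Set Int) :
    PySem.Set.diff (PySem.Set.diff s u) (PySem.Set.diff t u) =
      PySem.Set.diff s (PySem.Set.union u t) := by
  simp only [PySem.Set.diff, List.filter_filter]
  apply List.filter_congr
  intro x _
  by_cases hu : x ∈ u <;> by_cases ht : x ∈ t <;>
    simp [PySem.Set.union, PySem.Set.mem_update, hu, ht]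

-- the key invariant: A's rebuilt dict is B's untouched dict filtered by `selected`
-- with `used` subtracted from every value
theorem pv_main : ∀ (n : Nat) (d0 : List (Int × PySem.Set Int)) (used chosen : PySem.Set Int)
    (sel : List Int), (d0.map (fun p => p.1)).Nodup →
    (∀ x : Int, chosen.contains x = sel.contains x) →
    pvGreedyA n ((d0.filter (fun p => !(sel.contains p.1))).map
        (fun p => (p.1, PySem.Set.diff p.2 used))) sel
      = pvGreedyB n d0 used chosen sel
  | 0, _, _, _, _, _, _ => rfl
  | n+1, d0, used, chosen, sel, hnd, hch => by
    simp only [pvGreedyA, pvGreedyB, List.map_map]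
    have hcand : (d0.map (fun p => p.1)).filter (fun c => !(chosen.contains c)) =
        (d0.filter (fun p => !(sel.contains p.1))).map (fun p => p.1) := by
      rw [List.filter_congr (fun x _ => by rw [hch x])]
      exact (pv_map_fst_filter _ _).symm
    set F := d0.filter (fun p => !(sel.contains p.1)) with hF
    have hFsub : F.Sublist d0 := List.filter_sublist
    have hFnd : (F.map (fun p => p.1)).Nodup := (hFsub.map _).nodup hnd
    have hmemd0 : ∀ p ∈ F, p ∈ d0 := fun p hp => List.mem_of_mem_filter hp
    -- B's key agrees on F with the length of the subtracted stored value
    have hkey : PySem.List.max? (F.map (fun p => p.1))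
          (fun c => PySem.Set.len (PySem.Set.diff (pvLookup d0 c) used)) =
        (PySem.List.max? F (fun p => PySem.Set.len (PySem.Set.diff p.2 used))).map (fun p => p.1) := by
      rw [pv_max?_map]
      congr 1
      apply pv_max?_congr_mem
      intro p hp
      rw [pv_lookup_mem d0 p.1 p.2 hnd (hmemd0 p hp)]
    -- A's sorted head is the same first maximum
    have hA : PySem.List.pyGet?
          (PySem.List.sorted (F.map (fun p => (p.1, PySem.Set.len (PySem.Set.diff p.2 used))))
            (fun x => x.2) true) 0 =
        (PySem.List.max? F (fun p => PySem.Set.len (PySem.Set.diff p.2 used))).map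
          (fun p => (p.1, PySem.Set.len (PySem.Set.diff p.2 used))) := by
      rw [PySem.List.pyGet?_zero, ← List.head?_eq_getElem?, pv_head?_sorted_rev, pv_max?_map]
    rw [Function.comp_def] at *
    rw [hcand, hkey, hA]
    cases hM : PySem.List.max? F (fun p => PySem.Set.len (PySem.Set.diff p.2 used)) with
    | none => rfl
    | some m =>
      have hmF : m ∈ F := PySem.List.max?_mem hM
      simp only [Option.map_some]
      -- A's cover1[cid0] is m's subtracted value; B's cover[best] is m's stored value
      have hlookA : pvLookup (F.map (fun p => (p.1, PySem.Set.diff p.2 used))) m.1 =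
          PySem.Set.diff m.2 used := by
        apply pv_lookup_mem
        · simpa [List.map_map, Function.comp_def] using hFnd
        · exact List.mem_map_of_mem hmF
      have hlookB : pvLookup d0 m.1 = m.2 := pv_lookup_mem d0 m.1 m.2 hnd (hmemd0 m hmF)
      rw [hlookA, hlookB]
      -- the rebuilt dict for the next round
      have hstate : ((F.map (fun p => (p.1, PySem.Set.diff p.2 used))).filter
            (fun p => !(p.1 == m.1))).map
            (fun p => (p.1, PySem.Set.diff p.2 (PySem.Set.diff m.2 used))) =
          (d0.filter (fun p => !((sel ++ [m.1]).contains p.1))).map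
            (fun p => (p.1, PySem.Set.diff p.2 (PySem.Set.union used m.2))) := by
        rw [pv_filter_map_fst (fun c => !(c == m.1)) _ F, List.map_map, hF, List.filter_filter]
        have hpred : ∀ p ∈ d0, (!(p.1 == m.1) && !(sel.contains p.1)) =
            !((sel ++ [m.1]).contains p.1) := by
          intro p _
          by_cases h1 : p.1 ∈ sel <;> by_cases h2 : p.1 = m.1 <;>
            simp [List.contains_eq_mem, h1, h2]
        rw [List.filter_congr hpred]
        apply List.map_congr_left
        intro p _
        simp [pv_diff_diff]
      rw [hstate]
      have hmem : ∀ x : Int, x ∈ chosen ↔ x ∈ sel := by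
        intro x
        have := hch x
        simpa [List.contains_eq_mem] using this
      exact pv_main n d0 (PySem.Set.union used m.2) (PySem.Set.add chosen m.1) (sel ++ [m.1]) hnd
        (by intro x; simp [List.contains_eq_mem, PySem.Set.mem_add, hmem x])

theorem greedy_nodup_spec : Claim_equal_greedy_nodup := by
  intro cover k _ _
  unfold Spec_greedy_nodup greedy_nodup greedy_nodup_alt
  have hnd : ((pvDecode cover).map (fun p => p.1)).Nodup := by
    have h := PySem.Dict.nodup_keys_ofList (κ := Int) (ν := List Int) cover
    simpa [pvDecode, PySem.Dict.keys, List.map_map, Function.comp_def] using h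
  have hinit : ((pvDecode cover).filter (fun p => !(([] : List Int).contains p.1))).map
      (fun p => (p.1, PySem.Set.diff p.2 PySem.Set.empty)) = pvDecode cover := by
    simp [PySem.Set.diff, PySem.Set.empty]
  rw [← pv_main k.toNat (pvDecode cover) PySem.Set.empty PySem.Set.empty [] hnd (fun _ => rfl), hinit]
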